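-- pv_equiv track=rewrite | github.com/lightwrath/Selenium-lightwrath.com | 2048.py | lineCalc
-- ===== SOURCE A (Python) =====
-- def lineCalc(line):
--    lineScore = 0
--    for a in range(line.count(0)):
--       line.remove(0)
--    for b in range(len(line) - 1):
--       if line[b] == line[b + 1]:
--          lineScore = lineScore + line[b] + line[b + 1]
--    return lineScore
-- ===== SOURCE B (Python) =====
-- def lineCalc(line):
--     # One fused pass: skip zeros, track previous nonzero, compact line in place.
--     lineScore = 0
--     prev = None
--     write = 0
--     for x in line:
--         if x != 0:
--             if x == prev:
--                 lineScore += prev + x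
--             prev = x
--             line[write] = x
--             write += 1
--     del line[write:]
--     return lineScore
-- ===== Notes on version B (the rewrite author's own statement) =====
-- stated objective: simpler
-- what changed: Replaces the two separate phases (repeated list.remove(0) compaction, then an index-pair scan) with one fused left-to-right pass that skips zeros, tracks the previous nonzero value to score equal neighbours, and compacts the list in place with a write index.
import Mathlib
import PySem

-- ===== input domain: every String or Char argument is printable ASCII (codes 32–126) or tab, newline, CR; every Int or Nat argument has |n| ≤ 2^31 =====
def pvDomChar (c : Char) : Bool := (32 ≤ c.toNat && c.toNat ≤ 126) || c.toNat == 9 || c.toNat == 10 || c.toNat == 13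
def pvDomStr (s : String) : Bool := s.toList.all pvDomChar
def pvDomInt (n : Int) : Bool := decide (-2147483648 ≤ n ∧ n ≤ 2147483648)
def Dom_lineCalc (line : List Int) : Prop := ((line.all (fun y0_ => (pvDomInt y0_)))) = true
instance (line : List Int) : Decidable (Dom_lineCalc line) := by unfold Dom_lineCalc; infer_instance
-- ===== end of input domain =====

-- B changes the algorithm to one fused pass (skip zeros, score via previous nonzero): simpler/linear.
-- A mutates `line` in place (removes the zeros); B performs the same mutation; the Lean claim is about the return value only.

-- ===== PORT A =====
-- for a in range(line.count(0)): line.remove(0)   (the 0 is always present, so remove? never fails; getD is a totality guard)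
def lineCalc (line : List Int) : Int :=
  let line2 := (PySem.List.pyRange 0 (PySem.List.count line 0 : Nat) 1).foldl
      (fun l _ => (PySem.List.remove? l 0).getD l) line
  -- for b in range(len(line)-1): indices b, b+1 are always in range, so pyGetD is exact here
  (PySem.List.pyRange 0 (PySem.List.len line2 - 1) 1).foldl
      (fun s b => if PySem.List.pyGetD line2 b 0 = PySem.List.pyGetD line2 (b + 1) 0
                  then s + PySem.List.pyGetD line2 b 0 + PySem.List.pyGetD line2 (b + 1) 0
                  else s) 0

-- ===== PORT B =====
-- state = (lineScore, prev); the write index only affects the mutation, not the return value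
def lineCalc_alt (line : List Int) : Int :=
  (line.foldl
    (fun st x =>
      if x ≠ 0 then
        match st.2 with
        | some p => if x = p then (st.1 + p + x, some x) else (st.1, some x)
        | none   => (st.1, some x)
      else st)
    ((0 : Int), (none : Option Int))).1

-- ===== PRECONDITION & SPEC =====
def Spec_lineCalc (line : List Int) (out : Int) : Prop := out = lineCalc_alt line
instance (line : List Int) (out : Int) : Decidable (Spec_lineCalc line out) := by unfold Spec_lineCalc; infer_instance

-- ===== CLAIM (what is proved, stated in full; the proofs are below) =====
def Claim_equal_lineCalc : Prop := ∀ (line : List Int), Dom_lineCalc line → Spec_lineCalc line (lineCalc line)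

-- ===== LEMMAS AND PROOFS =====

-- sum of a+b over adjacent equal pairs, with p the previous element
def pairSum2 (p : Int) : List Int → Int
  | [] => 0
  | x :: rest => (if x = p then p + x else 0) + pairSum2 x rest

def pairSum : List Int → Int
  | [] => 0
  | x :: rest => pairSum2 x rest

-- 1. the removal loop yields the zero-free sublist
def stepA (l : List Int) : List Int := (PySem.List.remove? l 0).getD l

theorem stepA_cons {a : Int} (l : List Int) (ha : a ≠ 0) : stepA (a :: l) = a :: stepA l := by
  unfold stepA
  rw [PySem.List.remove?_cons_of_ne l ha]
  cases PySem.List.remove? l 0 <;> simp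

theorem stepA_iter_cons {a : Int} (ha : a ≠ 0) :
    ∀ (n : Nat) (l : List Int), stepA^[n] (a :: l) = a :: stepA^[n] l := by
  intro n
  induction n with
  | zero => intro l; simp
  | succ n ih =>
    intro l
    rw [Function.iterate_succ_apply, Function.iterate_succ_apply, stepA_cons l ha, ih]

theorem foldl_const_iter {α β : Type} (f : α → α) (init : α) (t : List β) :
    t.foldl (fun m _ => f m) init = f^[t.length] init := by
  induction t generalizing init with
  | nil => simp
  | cons x r ih => simp [List.foldl_cons, ih, Function.iterate_succ_apply]

theorem stepA_iter_count (l : List Int) :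
    stepA^[l.count 0] l = l.filter (fun x => x ≠ 0) := by
  induction l with
  | nil => simp
  | cons a r ih =>
    by_cases ha : a = 0
    · subst ha
      rw [List.count_cons_self, Function.iterate_succ_apply,
          show stepA (0 :: r) = r by unfold stepA; simp]
      simpa using ih
    · rw [List.count_cons_of_ne ha, stepA_iter_cons ha, ih]
      simp [ha]

theorem remove_iter (l : List Int) :
    (PySem.List.pyRange 0 (PySem.List.count l 0 : Nat) 1).foldl (fun m _ => stepA m) l
      = l.filter (fun x => x ≠ 0) := by
  rw [foldl_const_iter]
  rw [show (PySem.List.pyRange 0 (PySem.List.count l 0 : Nat) 1).length = l.count 0 by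
        simp [PySem.List.length_pyRange_one, PySem.List.count]]
  exact stepA_iter_count l

-- 2. A's index loop computes pairSum
theorem idx_aux (t : List Int) : ∀ (a s : Int),
    (List.range t.length).foldl
      (fun acc k => if (a :: t).getD k 0 = (a :: t).getD (k + 1) 0
                    then acc + (a :: t).getD k 0 + (a :: t).getD (k + 1) 0
                    else acc) s = s + pairSum2 a t := by
  induction t with
  | nil => intro a s; simp [pairSum2]
  | cons x r ih =>
    intro a s
    rw [show (x :: r).length = r.length + 1 from rfl, List.range_succ_eq_map,
        List.foldl_cons, List.foldl_map]
    have hstep : ∀ (acc : Int) (k : Nat),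
        (if (a :: x :: r).getD (k + 1) 0 = (a :: x :: r).getD (k + 1 + 1) 0
         then acc + (a :: x :: r).getD (k + 1) 0 + (a :: x :: r).getD (k + 1 + 1) 0
         else acc)
        = (if (x :: r).getD k 0 = (x :: r).getD (k + 1) 0
           then acc + (x :: r).getD k 0 + (x :: r).getD (k + 1) 0
           else acc) := by
      intro acc k
      simp
    calc (List.range r.length).foldl
          (fun acc k => if (a :: x :: r).getD (Nat.succ k) 0 = (a :: x :: r).getD (Nat.succ k + 1) 0
                        then acc + (a :: x :: r).getD (Nat.succ k) 0 + (a :: x :: r).getD (Nat.succ k + 1) 0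
                        else acc)
          (if (a :: x :: r).getD 0 0 = (a :: x :: r).getD 1 0
           then s + (a :: x :: r).getD 0 0 + (a :: x :: r).getD 1 0 else s)
        = (List.range r.length).foldl
          (fun acc k => if (x :: r).getD k 0 = (x :: r).getD (k + 1) 0
                        then acc + (x :: r).getD k 0 + (x :: r).getD (k + 1) 0
                        else acc)
          (if a = x then s + a + x else s) := by
          apply PySem.List.foldl_congr_mem
          intro acc k _
          exact hstep acc k
      _ = (if a = x then s + a + x else s) + pairSum2 x r := ih x _
      _ = s + pairSum2 a (x :: r) := by
          rw [show pairSum2 a (x :: r) = (if x = a then a + x else 0) + pairSum2 x r from rfl]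
          by_cases h : x = a
          · rw [if_pos h, if_pos h.symm]; ring
          · rw [if_neg h, if_neg (fun hh => h hh.symm)]; ring

theorem idx_loop (l : List Int) :
    (PySem.List.pyRange 0 (PySem.List.len l - 1) 1).foldl
      (fun s b => if PySem.List.pyGetD l b 0 = PySem.List.pyGetD l (b + 1) 0
                  then s + PySem.List.pyGetD l b 0 + PySem.List.pyGetD l (b + 1) 0
                  else s) 0 = pairSum l := by
  cases l with
  | nil =>
    rw [PySem.List.pyRange_one_eq_nil (by simp [PySem.List.len])]
    rfl
  | cons a t =>
    have hlen : PySem.List.len (a :: t) - 1 = ((t.length : Int)) := by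
      simp [PySem.List.len]
    rw [hlen, PySem.List.pyRange_one, List.foldl_map]
    have hr : ((t.length : Int) - 0).toNat = t.length := by omega
    rw [hr, show pairSum (a :: t) = pairSum2 a t from rfl]
    have hcg : (List.range t.length).foldl
        (fun (s : Int) (k : Nat) => if PySem.List.pyGetD (a :: t) (0 + (k : Int)) 0 = PySem.List.pyGetD (a :: t) (0 + (k : Int) + 1) 0
                    then s + PySem.List.pyGetD (a :: t) (0 + (k : Int)) 0 + PySem.List.pyGetD (a :: t) (0 + (k : Int) + 1) 0
                    else s) 0
      = (List.range t.length).foldl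
        (fun s k => if (a :: t).getD k 0 = (a :: t).getD (k + 1) 0
                    then s + (a :: t).getD k 0 + (a :: t).getD (k + 1) 0
                    else s) 0 := by
      apply PySem.List.foldl_congr_mem
      intro acc k _
      have h2 : (0 : Int) + (k : Int) + 1 = ((k + 1 : Nat) : Int) := by push_cast; ring
      have h1 : (0 : Int) + (k : Int) = ((k : Nat) : Int) := by ring
      rw [h2, h1, PySem.List.pyGetD_natCast, PySem.List.pyGetD_natCast]
    rw [hcg]
    simpa using idx_aux t a 0

-- 3. B's fold computes pairSum of the filtered list
def stepB (st : Int × Option Int) (x : Int) : Int × Option Int :=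
  match st.2 with
  | some p => if x = p then (st.1 + p + x, some x) else (st.1, some x)
  | none => (st.1, some x)

theorem stepB_fold_some (m : List Int) : ∀ (p s : Int),
    (m.foldl stepB (s, some p)).1 = s + pairSum2 p m := by
  induction m with
  | nil => intro p s; simp [pairSum2]
  | cons x r ih =>
    intro p s
    rw [List.foldl_cons,
        show stepB (s, some p) x = if x = p then (s + p + x, some x) else (s, some x) from rfl,
        show pairSum2 p (x :: r) = (if x = p then p + x else 0) + pairSum2 x r from rfl]
    by_cases h : x = p
    · rw [if_pos h, if_pos h, ih]; ring
    · rw [if_neg h, if_neg h, ih]; ring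

theorem alt_eq_pairSum (l : List Int) :
    lineCalc_alt l = pairSum (l.filter (fun x => x ≠ 0)) := by
  unfold lineCalc_alt
  rw [show (fun (st : Int × Option Int) (x : Int) =>
        if x ≠ 0 then
          match st.2 with
          | some p => if x = p then (st.1 + p + x, some x) else (st.1, some x)
          | none   => (st.1, some x)
        else st)
      = (fun st x => if x ≠ 0 then stepB st x else st) from rfl]
  rw [PySem.List.foldl_ite_eq_foldl_filter]
  cases h : l.filter (fun x => x ≠ 0) with
  | nil => rfl
  | cons x r =>
    rw [List.foldl_cons, show stepB (0, none) x = ((0 : Int), some x) from rfl,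
        show pairSum (x :: r) = pairSum2 x r from rfl]
    simpa using stepB_fold_some r x 0

-- ===== VERDICT (by name: the statement is the Claim_ definition above) =====
theorem lineCalc_spec : Claim_equal_lineCalc := by
  intro line _
  unfold Spec_lineCalc lineCalc
  rw [show (fun (l : List Int) (_ : Int) => (PySem.List.remove? l 0).getD l) = (fun l _ => stepA l) from rfl,
      remove_iter, idx_loop, alt_eq_pairSum]
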